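-- pv_equiv track=rewrite | github.com/drewbrew/advent-of-code-2023 | day11.py | parse_input_part_2
-- ===== SOURCE A (Python) =====
-- def parse_input_part_2(puzzle: str) -> tuple[set[tuple[int, int]], set[int], set[int]]:
--     grid = set()
--     blank_rows = set()
--     blank_columns = set()
--     lines = puzzle.splitlines()
--     for index, line in enumerate(lines):
--         if all(char == "." for char in line):
--             blank_rows.add(index)
--     for x in range(len(lines[0])):
--         if all(char == "." for char in (line[x] for line in lines)):
--             blank_columns.add(x)
--     for y, row in enumerate(lines):
--         for x, char in enumerate(row):
--             if char == "#":
--                 grid.add((x, y))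
--     return grid, blank_rows, blank_columns
-- ===== SOURCE B (Python) =====
-- def parse_input_part_2(puzzle: str) -> tuple[set[tuple[int, int]], set[int], set[int]]:
--     lines = puzzle.splitlines()
--     ncols = len(lines[0])
--     grid = set()
--     occupied_rows = set()
--     occupied_cols = set()
--     for y, row in enumerate(lines):
--         for x, char in enumerate(row):
--             if char == "#":
--                 grid.add((x, y))
--             if char != ".":
--                 occupied_rows.add(y)
--                 occupied_cols.add(x)
--     return grid, set(range(len(lines))) - occupied_rows, set(range(ncols)) - occupied_cols
-- ===== Notes on version B (the rewrite author's own statement) =====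
-- stated objective: faster
-- what changed: A makes three passes (blank rows, a generator-based scan over all lines for every column, then galaxies); B makes one nested pass collecting galaxies and occupied rows/columns, and derives the blank sets as range-minus-occupied.
import Mathlib
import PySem

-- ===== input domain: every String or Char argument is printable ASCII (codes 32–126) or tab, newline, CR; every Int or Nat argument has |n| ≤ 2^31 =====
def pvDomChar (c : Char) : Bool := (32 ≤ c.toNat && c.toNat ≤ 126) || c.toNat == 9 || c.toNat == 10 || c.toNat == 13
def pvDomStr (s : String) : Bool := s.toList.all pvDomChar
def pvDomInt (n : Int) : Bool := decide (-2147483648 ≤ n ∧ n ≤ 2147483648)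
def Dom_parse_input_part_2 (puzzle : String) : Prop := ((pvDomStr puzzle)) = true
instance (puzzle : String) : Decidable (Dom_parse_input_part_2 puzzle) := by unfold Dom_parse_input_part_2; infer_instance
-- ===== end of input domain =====

-- B replaces A's three passes (blank rows, per-column scans, galaxies) by one nested pass that
-- collects galaxies and occupied rows/columns, returning the blank sets as range minus occupied.
-- ===== PORT A =====

-- all(char == "." for char in (line[x] for line in lines)): some true / some false = the Python value,
-- none = the generator raised IndexError at a line with len(line) <= x (excluded by Pre_)
def pvA_colAll (lines : List String) (x : Int) : Option Bool :=
  match lines with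
  | [] => some true
  | l :: rest =>
    match PySem.Str.pyGet? l x with
    | none => none
    | some c => if c == '.' then pvA_colAll rest x else some false

def pvA_rows (lines : List String) : PySem.Set Int :=
  (PySem.List.enumerate lines).foldl
    (fun s p => if p.2.toList.all (fun c => c == '.') then PySem.Set.add s p.1 else s)
    PySem.Set.empty

def pvA_cols (lines : List String) (l0 : String) : PySem.Set Int :=
  (PySem.List.pyRange 0 (PySem.Str.len l0) 1).foldl
    (fun s x => if pvA_colAll lines x == some true then PySem.Set.add s x else s)
    PySem.Set.empty

def pvA_grid (lines : List String) : PySem.Set (Int × Int) :=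
  (PySem.List.enumerate lines).foldl
    (fun g p => (PySem.List.enumerate p.2.toList).foldl
        (fun g q => if q.2 == '#' then PySem.Set.add g (q.1, p.1) else g) g)
    PySem.Set.empty

def parse_input_part_2 (puzzle : String) : (List (Int × Int)) × List Int × List Int :=
  let lines := PySem.Str.splitlines puzzle
  match PySem.List.pyGet? lines 0 with
  | none => ([], pvA_rows lines, [])  -- lines[0] raises IndexError here (outside Pre_)
  | some l0 => (pvA_grid lines, pvA_rows lines, pvA_cols lines l0)

-- ===== PORT B =====

def pvB_step (y : Int) (st : PySem.Set (Int × Int) × PySem.Set Int × PySem.Set Int)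
    (q : Int × Char) : PySem.Set (Int × Int) × PySem.Set Int × PySem.Set Int :=
  let st1 := if q.2 == '#' then (PySem.Set.add st.1 (q.1, y), st.2.1, st.2.2) else st
  if q.2 != '.' then (st1.1, PySem.Set.add st1.2.1 y, PySem.Set.add st1.2.2 q.1) else st1

def pvB_scan (lines : List String) : PySem.Set (Int × Int) × PySem.Set Int × PySem.Set Int :=
  (PySem.List.enumerate lines).foldl
    (fun st p => (PySem.List.enumerate p.2.toList).foldl (pvB_step p.1) st)
    (PySem.Set.empty, PySem.Set.empty, PySem.Set.empty)

def parse_input_part_2_alt (puzzle : String) : (List (Int × Int)) × List Int × List Int :=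
  let lines := PySem.Str.splitlines puzzle
  match PySem.List.pyGet? lines 0 with
  | none => ([], [], [])  -- lines[0] raises IndexError here (outside Pre_)
  | some l0 =>
    let st := pvB_scan lines
    (st.1,
     PySem.Set.diff (PySem.Set.ofList (PySem.List.pyRange 0 (lines.length : Int) 1)) st.2.1,
     PySem.Set.diff (PySem.Set.ofList (PySem.List.pyRange 0 (PySem.Str.len l0) 1)) st.2.2)

-- ===== PRECONDITION & SPEC =====
-- Pre_ excludes exactly the inputs on which A raises IndexError: the empty puzzle (lines[0]),
-- and puzzles where a column scan reaches a line shorter than the first line with only dots above it.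
def Pre_parse_input_part_2 (puzzle : String) : Prop :=
  let L := (PySem.Str.splitlines puzzle).map String.toList
  L ≠ [] ∧ ∀ x < (L.headD []).length, ∀ i < L.length,
    (L.getD i []).length ≤ x → ∃ j < i, (L.getD j []).getD x ' ' ≠ '.'
instance (puzzle : String) : Decidable (Pre_parse_input_part_2 puzzle) := by
  unfold Pre_parse_input_part_2; infer_instance

def pvWitness_parse_input_part_2 : String := "#.x\n...\n.#."

def Spec_parse_input_part_2 (puzzle : String) (out : (List (Int × Int)) × List Int × List Int) : Prop :=
  out = parse_input_part_2_alt puzzle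
instance (puzzle : String) (out : (List (Int × Int)) × List Int × List Int) :
    Decidable (Spec_parse_input_part_2 puzzle out) := by unfold Spec_parse_input_part_2; infer_instance

-- ===== CLAIM (what is proved, stated in full; the proofs are below) =====
def Claim_equal_parse_input_part_2 : Prop := ∀ (puzzle : String), Dom_parse_input_part_2 puzzle → Pre_parse_input_part_2 puzzle → Spec_parse_input_part_2 puzzle (parse_input_part_2 puzzle)
-- ===== LEMMAS AND PROOFS =====

def pvOccR (lines : List String) : PySem.Set Int :=
  (PySem.List.enumerate lines).foldl
    (fun s p => (PySem.List.enumerate p.2.toList).foldl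
        (fun s q => if q.2 != '.' then PySem.Set.add s p.1 else s) s)
    PySem.Set.empty

def pvOccC (lines : List String) : PySem.Set Int :=
  (PySem.List.enumerate lines).foldl
    (fun s p => (PySem.List.enumerate p.2.toList).foldl
        (fun s q => if q.2 != '.' then PySem.Set.add s q.1 else s) s)
    PySem.Set.empty

theorem pv_step_split (y : Int) (st : PySem.Set (Int × Int) × PySem.Set Int × PySem.Set Int)
    (q : Int × Char) :
    pvB_step y st q =
      ((if q.2 == '#' then PySem.Set.add st.1 (q.1, y) else st.1),
       (if q.2 != '.' then PySem.Set.add st.2.1 y else st.2.1),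
       (if q.2 != '.' then PySem.Set.add st.2.2 q.1 else st.2.2)) := by
  unfold pvB_step
  by_cases h1 : q.2 == '#' <;> by_cases h2 : q.2 != '.' <;> simp [h1, h2]

theorem pv_inner_split (y : Int) :
    ∀ (ps : List (Int × Char)) (st : PySem.Set (Int × Int) × PySem.Set Int × PySem.Set Int),
    ps.foldl (pvB_step y) st =
      (ps.foldl (fun g q => if q.2 == '#' then PySem.Set.add g (q.1, y) else g) st.1,
       ps.foldl (fun s q => if q.2 != '.' then PySem.Set.add s y else s) st.2.1,
       ps.foldl (fun s q => if q.2 != '.' then PySem.Set.add s q.1 else s) st.2.2) := by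
  intro ps
  induction ps with
  | nil => intro st; rfl
  | cons q t ih =>
    intro st
    simp only [List.foldl_cons, pv_step_split, ih]

theorem pv_scan_split_aux :
    ∀ (L : List (Int × String)) (st : PySem.Set (Int × Int) × PySem.Set Int × PySem.Set Int),
    L.foldl (fun st p => (PySem.List.enumerate p.2.toList).foldl (pvB_step p.1) st) st =
      (L.foldl (fun g p => (PySem.List.enumerate p.2.toList).foldl
          (fun g q => if q.2 == '#' then PySem.Set.add g (q.1, p.1) else g) g) st.1,
       L.foldl (fun s p => (PySem.List.enumerate p.2.toList).foldl
          (fun s q => if q.2 != '.' then PySem.Set.add s p.1 else s) s) st.2.1,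
       L.foldl (fun s p => (PySem.List.enumerate p.2.toList).foldl
          (fun s q => if q.2 != '.' then PySem.Set.add s q.1 else s) s) st.2.2) := by
  intro L
  induction L with
  | nil => intro st; rfl
  | cons p t ih =>
    intro st
    simp only [List.foldl_cons]
    rw [pv_inner_split, ih]

theorem pv_scan_split (lines : List String) :
    pvB_scan lines = (pvA_grid lines, pvOccR lines, pvOccC lines) := by
  unfold pvB_scan pvA_grid pvOccR pvOccC
  exact pv_scan_split_aux (PySem.List.enumerate lines) _

theorem pv_foldl_if_add_eq_filter (pred : Int → Bool) :
    ∀ (l : List Int) (s : PySem.Set Int), l.Pairwise (· < ·) → (∀ b ∈ l, b ∉ s) →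
    l.foldl (fun s x => if pred x then PySem.Set.add s x else s) s = s ++ l.filter pred := by
  intro l
  induction l with
  | nil => intro s _ _; simp
  | cons x t ih =>
    intro s hp hb
    rcases List.pairwise_cons.mp hp with ⟨hxt, hpt⟩
    simp only [List.foldl_cons, List.filter_cons]
    by_cases hpx : pred x
    · simp only [hpx, if_true]
      rw [PySem.Set.add_of_not_mem (hb x (by simp))]
      rw [ih (s ++ [x]) hpt ?_]
      · simp
      · intro b hbt
        simp only [List.mem_append, List.mem_singleton]
        rintro (h | rfl)
        · exact hb b (by simp [hbt]) h
        · exact absurd rfl (ne_of_gt (hxt b hbt)).symm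
    · simp only [hpx]
      exact ih s hpt (fun b hbt => hb b (by simp [hbt]))

theorem pv_mem_foldl_if_add {α β : Type} [BEq β] [LawfulBEq β] (pred : α → Bool) (f : α → β) :
    ∀ (ps : List α) (s : PySem.Set β) (y : β),
    (y ∈ ps.foldl (fun s q => if pred q then PySem.Set.add s (f q) else s) s ↔
      y ∈ s ∨ ∃ q ∈ ps, pred q ∧ y = f q) := by
  intro ps
  induction ps with
  | nil => simp
  | cons q t ih =>
    intro s y
    simp only [List.foldl_cons]
    by_cases hq : pred q
    · rw [if_pos hq, ih, PySem.Set.mem_add]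
      constructor
      · rintro (⟨h | rfl⟩ | ⟨r, hr, hpr, rfl⟩)
        · exact Or.inl h
        · exact Or.inr ⟨q, by simp, hq, rfl⟩
        · exact Or.inr ⟨r, by simp [hr], hpr, rfl⟩
      · rintro (h | ⟨r, hr, hpr, rfl⟩)
        · exact Or.inl (Or.inl h)
        · rcases List.mem_cons.mp hr with rfl | hr
          · exact Or.inl (Or.inr rfl)
          · exact Or.inr ⟨r, hr, hpr, rfl⟩
    · rw [if_neg hq, ih]
      constructor
      · rintro (h | ⟨r, hr, hpr, rfl⟩)
        · exact Or.inl h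
        · exact Or.inr ⟨r, by simp [hr], hpr, rfl⟩
      · rintro (h | ⟨r, hr, hpr, rfl⟩)
        · exact Or.inl h
        · rcases List.mem_cons.mp hr with rfl | hr
          · exact absurd hpr (by simp [hq])
          · exact Or.inr ⟨r, hr, hpr, rfl⟩

theorem pv_mem_occ {β : Type} [BEq β] [LawfulBEq β] (f : Int → Int × Char → β) :
    ∀ (L : List (Int × String)) (s : PySem.Set β) (y : β),
    (y ∈ L.foldl (fun s p => (PySem.List.enumerate p.2.toList).foldl
        (fun s q => if q.2 != '.' then PySem.Set.add s (f p.1 q) else s) s) s ↔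
      y ∈ s ∨ ∃ p ∈ L, ∃ q ∈ PySem.List.enumerate p.2.toList, q.2 ≠ '.' ∧ y = f p.1 q) := by
  intro L
  induction L with
  | nil => simp
  | cons p t ih =>
    intro s y
    simp only [List.foldl_cons]
    rw [ih]
    rw [pv_mem_foldl_if_add (pred := fun q => q.2 != '.') (f := f p.1)]
    simp only [bne_iff_ne, List.mem_cons]
    constructor
    · rintro ((h | ⟨q, hq, hne, rfl⟩) | ⟨r, hr, hq⟩)
      · exact Or.inl h
      · exact Or.inr ⟨p, Or.inl rfl, q, hq, hne, rfl⟩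
      · exact Or.inr ⟨r, Or.inr hr, hq⟩
    · rintro (h | ⟨r, (rfl | hr), hq⟩)
      · exact Or.inl (Or.inl h)
      · exact Or.inl (Or.inr hq)
      · exact Or.inr ⟨r, hr, hq⟩

theorem pv_mem_occR (lines : List String) (y : Int) :
    y ∈ pvOccR lines ↔ ∃ k, ∃ hk : k < lines.length,
      (∃ m, ∃ hm : m < (lines[k]).toList.length, (lines[k]).toList[m] ≠ '.') ∧ y = (k : Int) := by
  unfold pvOccR
  rw [pv_mem_occ (f := fun a _ => a)]
  constructor
  · rintro (h | ⟨p, hp, q, hq, hne, rfl⟩)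
    · simp at h
    · rcases (PySem.List.mem_enumerate_iff _ _ _).mp hp with ⟨k, hk, rfl⟩
      rcases (PySem.List.mem_enumerate_iff _ _ _).mp hq with ⟨m, hm, rfl⟩
      exact ⟨k, hk, ⟨m, hm, hne⟩, by simp⟩
  · rintro ⟨k, hk, ⟨m, hm, hne⟩, rfl⟩
    refine Or.inr ⟨(k, lines[k]), ?_, ((m : Int), (lines[k]).toList[m]), ?_, hne, by simp⟩
    · exact (PySem.List.mem_enumerate_iff _ _ _).mpr ⟨k, hk, by simp⟩
    · exact (PySem.List.mem_enumerate_iff _ _ _).mpr ⟨m, hm, by simp⟩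

theorem pv_mem_occC (lines : List String) (y : Int) :
    y ∈ pvOccC lines ↔ ∃ k, ∃ hk : k < lines.length,
      ∃ m, ∃ hm : m < (lines[k]).toList.length, (lines[k]).toList[m] ≠ '.' ∧ y = (m : Int) := by
  unfold pvOccC
  rw [pv_mem_occ (f := fun _ q => q.1)]
  constructor
  · rintro (h | ⟨p, hp, q, hq, hne, rfl⟩)
    · simp at h
    · rcases (PySem.List.mem_enumerate_iff _ _ _).mp hp with ⟨k, hk, rfl⟩
      rcases (PySem.List.mem_enumerate_iff _ _ _).mp hq with ⟨m, hm, rfl⟩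
      exact ⟨k, hk, m, hm, hne, by simp⟩
  · rintro ⟨k, hk, m, hm, hne, rfl⟩
    refine Or.inr ⟨(k, lines[k]), ?_, ((m : Int), (lines[k]).toList[m]), ?_, hne, by simp⟩
    · exact (PySem.List.mem_enumerate_iff _ _ _).mpr ⟨k, hk, by simp⟩
    · exact (PySem.List.mem_enumerate_iff _ _ _).mpr ⟨m, hm, by simp⟩

theorem pvA_rows_eq_filter (lines : List String) :
    pvA_rows lines = (PySem.List.pyRange 0 (PySem.List.len lines) 1).filter
      (fun i => (PySem.List.pyGetD lines i "").toList.all (fun c => c == '.')) := by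
  unfold pvA_rows
  rw [PySem.List.enumerate_eq_map_pyRange (d := ""), List.foldl_map]
  have h := pv_foldl_if_add_eq_filter
      (fun i => (PySem.List.pyGetD lines i "").toList.all (fun c => c == '.'))
      (PySem.List.pyRange 0 (PySem.List.len lines) 1) PySem.Set.empty
      (PySem.List.pairwise_lt_pyRange_one _ _) (by intro b _ hb; simp [PySem.Set.empty] at hb)
  simpa using h

theorem pvA_cols_eq_filter (lines : List String) (l0 : String) :
    pvA_cols lines l0 = (PySem.List.pyRange 0 (PySem.Str.len l0) 1).filter
      (fun x => pvA_colAll lines x == some true) := by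
  unfold pvA_cols
  have h := pv_foldl_if_add_eq_filter
      (fun x => pvA_colAll lines x == some true)
      (PySem.List.pyRange 0 (PySem.Str.len l0) 1) PySem.Set.empty
      (PySem.List.pairwise_lt_pyRange_one _ _) (by intro b _ hb; simp [PySem.Set.empty] at hb)
  simpa using h

theorem pv_colAll_true_iff (lines : List String) (x : Int) :
    pvA_colAll lines x = some true ↔ ∀ l ∈ lines, PySem.List.pyGet? l.toList x = some '.' := by
  induction lines with
  | nil => simp [pvA_colAll]
  | cons l rest ih =>
    rw [pvA_colAll]
    cases h : PySem.Str.pyGet? l x with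
    | none =>
      have h' : PySem.List.pyGet? l.toList x = none := by simpa using h
      constructor
      · intro hc; simp at hc
      · intro hall; exact absurd (hall l (by simp)) (by simp [h'])
    | some c =>
      have h' : PySem.List.pyGet? l.toList x = some c := by simpa using h
      dsimp only
      by_cases hc : c = '.'
      · subst hc
        rw [if_pos (by simp), ih]
        constructor
        · intro hall l' hl'
          rcases List.mem_cons.mp hl' with rfl | hl'
          · exact h'
          · exact hall l' hl'
        · intro hall l' hl'; exact hall l' (List.mem_cons_of_mem _ hl')
      · rw [if_neg (by simpa using hc)]
        constructor
        · intro hcontra; simp at hcontra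
        · intro hall
          have h2 := hall l (by simp)
          rw [h'] at h2
          exact absurd (show c = '.' by simpa using h2) hc

theorem pv_all_long (lines : List String) (x : Nat)
    (hpre : ∀ i < lines.length, ((lines.map String.toList).getD i []).length ≤ x →
      ∃ j < i, ((lines.map String.toList).getD j []).getD x ' ' ≠ '.')
    (hno : ∀ k, (hk : k < lines.length) → ∀ hx : x < (lines[k]).toList.length,
      (lines[k]).toList[x] = '.') :
    ∀ i, (hi : i < lines.length) → x < (lines[i]).toList.length := by
  intro i
  induction i using Nat.strong_induction_on with
  | _ i ih =>
    intro hi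
    by_contra hlen
    rw [not_lt] at hlen
    have hgd : ((lines.map String.toList).getD i []).length ≤ x := by
      simpa [List.getD_eq_getElem?_getD, List.getElem?_map,
        List.getElem?_eq_getElem hi] using hlen
    obtain ⟨j, hj, hne⟩ := hpre i hi hgd
    have hji : j < lines.length := hj.trans hi
    have hjlen : x < (lines[j]).toList.length := ih j hj hji
    have hval : ((lines.map String.toList).getD j []).getD x ' ' = (lines[j]).toList[x] := by
      simp [List.getD_eq_getElem?_getD, List.getElem?_map,
        List.getElem?_eq_getElem hji, List.getElem?_eq_getElem hjlen]
    exact hne (hval.trans (hno j hji hjlen))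

theorem pv_rows_eq (lines : List String) :
    pvA_rows lines = PySem.Set.diff
      (PySem.Set.ofList (PySem.List.pyRange 0 (lines.length : Int) 1)) (pvOccR lines) := by
  rw [pvA_rows_eq_filter,
    PySem.Set.ofList_eq_self_of_nodup _ (PySem.List.nodup_pyRange_one _ _)]
  have hlen : PySem.List.len lines = (lines.length : Int) := by simp
  rw [hlen]
  simp only [PySem.Set.diff]
  apply List.filter_congr
  intro i hi
  obtain ⟨h0, hlt⟩ := PySem.List.mem_pyRange_one.mp hi
  obtain ⟨k, rfl⟩ : ∃ k : Nat, i = (k : Int) := ⟨i.toNat, (Int.toNat_of_nonneg h0).symm⟩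
  have hk : k < lines.length := by exact_mod_cast hlt
  have hget : PySem.List.pyGetD lines (k : Int) "" = lines[k] := by
    simp [PySem.List.pyGetD_natCast, List.getD_eq_getElem?_getD, List.getElem?_eq_getElem hk]
  rw [hget]
  rw [Bool.eq_iff_iff, List.all_eq_true]
  have hrhs : ((!PySem.Set.contains (pvOccR lines) (k : Int)) = true) ↔
      ¬ ((k : Int) ∈ pvOccR lines) := by simp [PySem.Set.contains_iff]
  rw [hrhs, pv_mem_occR]
  constructor
  · rintro hall ⟨k', hk', ⟨m, hm, hne⟩, hkk⟩
    have : k' = k := by exact_mod_cast hkk.symm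
    subst this
    exact hne (by simpa using hall _ (List.getElem_mem hm))
  · intro hnot c hc
    rcases List.mem_iff_getElem.mp hc with ⟨m, hm, rfl⟩
    by_contra hc'
    exact hnot ⟨k, hk, ⟨m, hm, by simpa using hc'⟩, rfl⟩

theorem pv_cols_eq (lines : List String) (l0 : String)
    (h0 : (lines.map String.toList).headD [] = l0.toList)
    (hpre : ∀ x < ((lines.map String.toList).headD []).length, ∀ i < lines.length,
      ((lines.map String.toList).getD i []).length ≤ x →
      ∃ j < i, ((lines.map String.toList).getD j []).getD x ' ' ≠ '.') :
    pvA_cols lines l0 = PySem.Set.diff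
      (PySem.Set.ofList (PySem.List.pyRange 0 (PySem.Str.len l0) 1)) (pvOccC lines) := by
  rw [pvA_cols_eq_filter,
    PySem.Set.ofList_eq_self_of_nodup _ (PySem.List.nodup_pyRange_one _ _)]
  simp only [PySem.Set.diff]
  apply List.filter_congr
  intro x hx
  obtain ⟨hx0, hxlt⟩ := PySem.List.mem_pyRange_one.mp hx
  obtain ⟨xn, rfl⟩ : ∃ k : Nat, x = (k : Int) := ⟨x.toNat, (Int.toNat_of_nonneg hx0).symm⟩
  have hxn : xn < l0.toList.length := by
    have hsl : PySem.Str.len l0 = (l0.toList.length : Int) := by simp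
    rw [hsl] at hxlt; exact_mod_cast hxlt
  have hno_of : (¬ ∃ k, ∃ hk : k < lines.length, ∃ m, ∃ hm : m < (lines[k]).toList.length,
      (lines[k]).toList[m] ≠ '.' ∧ (xn : Int) = (m : Int)) →
      ∀ k, (hk : k < lines.length) → ∀ hx : xn < (lines[k]).toList.length,
        (lines[k]).toList[xn] = '.' := by
    intro hnot k' hk' hx'
    by_contra hne'
    exact hnot ⟨k', hk', xn, hx', hne', rfl⟩
  rw [Bool.eq_iff_iff]
  have hrhs : ((!PySem.Set.contains (pvOccC lines) (xn : Int)) = true) ↔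
      ¬ ((xn : Int) ∈ pvOccC lines) := by simp [PySem.Set.contains_iff]
  rw [hrhs, pv_mem_occC, beq_iff_eq, pv_colAll_true_iff]
  constructor
  · rintro hall ⟨k, hk, m, hm, hne, hxm⟩
    have hmx : m = xn := by exact_mod_cast hxm.symm
    subst hmx
    have h2 := hall (lines[k]) (List.getElem_mem hk)
    rw [PySem.List.pyGet?_natCast, List.getElem?_eq_getElem hm] at h2
    exact hne (by simpa using h2)
  · intro hnot l hl
    rcases List.mem_iff_getElem.mp hl with ⟨k, hk, rfl⟩
    have hno := hno_of hnot
    have hlong : xn < (lines[k]).toList.length :=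
      pv_all_long lines xn (fun i hi hle => hpre xn (by rw [h0]; exact hxn) i hi hle) hno k hk
    rw [PySem.List.pyGet?_natCast, List.getElem?_eq_getElem hlong, hno k hk hlong]

theorem pv_main (puzzle : String)
    (hne : (PySem.Str.splitlines puzzle).map String.toList ≠ [])
    (hcol : ∀ x < (((PySem.Str.splitlines puzzle).map String.toList).headD []).length,
      ∀ i < ((PySem.Str.splitlines puzzle).map String.toList).length,
      (((PySem.Str.splitlines puzzle).map String.toList).getD i []).length ≤ x →
      ∃ j < i, (((PySem.Str.splitlines puzzle).map String.toList).getD j []).getD x ' ' ≠ '.') :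
    parse_input_part_2 puzzle = parse_input_part_2_alt puzzle := by
  unfold parse_input_part_2 parse_input_part_2_alt
  cases hl : PySem.Str.splitlines puzzle with
  | nil => rw [hl] at hne; simp at hne
  | cons l0 rest =>
    rw [hl] at hcol
    simp only [PySem.List.pyGet?_zero_cons]
    rw [pv_scan_split]
    simp only [List.length_map] at hcol
    refine Prod.ext rfl (Prod.ext ?_ ?_)
    · exact pv_rows_eq (l0 :: rest)
    · exact pv_cols_eq (l0 :: rest) l0 (by simp) (by simpa using hcol)

-- ===== VERDICT (by name: the statement is the Claim_ definition above) =====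
theorem parse_input_part_2_spec : Claim_equal_parse_input_part_2 := by
  intro puzzle _ hpre
  unfold Pre_parse_input_part_2 at hpre
  obtain ⟨hne, hcol⟩ := hpre
  unfold Spec_parse_input_part_2
  exact pv_main puzzle hne hcol
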